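-- pv_equiv track=rewrite | github.com/Chromatic-Vision/Flashbox | flashbox.py | check_for_same_digit
-- ===== SOURCE A (Python) =====
-- from collections import defaultdict
--
-- def check_for_same_digit(num):
--     number = str(num)
--
--     freq = defaultdict(int)
--     n = len(number)
--
--     for i in range(n):
--         freq[int(number[i])] += 1
--
--     freq_values = set(freq.values())
--
--     if len(freq_values) == 1:
--         return True
--
--     return False
-- ===== SOURCE B (Python) =====
-- def _run_lengths(ds):
--     # length of each run of equal consecutive elements, recursively via a split
--     if not ds:
--         return []
--     i = 0
--     while i < len(ds) and ds[i] == ds[0]: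
--         i += 1
--     return [i] + _run_lengths(ds[i:])
--
-- def check_for_same_digit(num):
--     digits = sorted(int(c) for c in str(num))
--     runs = _run_lengths(digits)
--     return runs != [] and all(r == runs[0] for r in runs)
-- ===== Notes on version B (the rewrite author's own statement) =====
-- stated objective: alternative
-- what changed: Sort-then-group-runs instead of hashing: sort the digits, recursively split off each run of equal digits collecting run lengths, and return True iff all run lengths equal (and there is at least one run); no dict and no set of frequencies.
import Mathlib
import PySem

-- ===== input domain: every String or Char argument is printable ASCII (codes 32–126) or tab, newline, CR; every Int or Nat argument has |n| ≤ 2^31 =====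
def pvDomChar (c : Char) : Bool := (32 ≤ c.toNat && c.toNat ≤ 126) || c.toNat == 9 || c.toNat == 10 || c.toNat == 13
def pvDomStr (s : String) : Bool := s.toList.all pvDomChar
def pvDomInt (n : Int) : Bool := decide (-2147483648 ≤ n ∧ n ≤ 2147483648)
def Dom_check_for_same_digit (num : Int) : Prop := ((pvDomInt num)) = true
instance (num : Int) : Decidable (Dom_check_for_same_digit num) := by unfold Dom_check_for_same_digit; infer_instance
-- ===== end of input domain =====

-- B sorts the digits and recursively splits off runs of equal digits, returning True iff
-- all run lengths are equal — sort-then-group-runs instead of A's frequency dict + set.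

-- ===== PORT A =====
-- int(number[i]) on a single char: PySem.Int.ofChars? [c]; the .getD 0 marks the ValueError
-- case (non-digit char, i.e. the '-' of a negative num), which Pre_ excludes.
def check_for_same_digit (num : Int) : Bool :=
  let number := PySem.Int.toChars num
  let n := PySem.List.len number
  let freq := (PySem.List.pyRange 0 n).foldl
    (fun d i => d.modify ((PySem.Int.ofChars? [PySem.List.pyGetD number i ' ']).getD 0) 0 (· + 1))
    (PySem.Dict.empty : PySem.Dict Int Int)
  let freq_values : PySem.Set Int := PySem.Set.ofList (PySem.Dict.values freq)
  if freq_values.length == 1 then true else false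

-- ===== PORT B =====
-- the while loop computes i = length of the leading run of elements equal to ds[0];
-- ds[i:] is List.drop i.
def pvRunLengths : List Int → List Int
  | [] => []
  | a :: t =>
    let i := ((a :: t).takeWhile (· == a)).length
    ((i : Int)) :: pvRunLengths ((a :: t).drop i)
  termination_by l => l.length
  decreasing_by
    simp only [List.takeWhile_cons, beq_self_eq_true, if_true, List.length_cons,
      List.drop_succ_cons, List.length_drop]
    omega

def check_for_same_digit_alt (num : Int) : Bool :=
  let digits := PySem.List.sorted
    ((PySem.Int.toChars num).map (fun c => (PySem.Int.ofChars? [c]).getD 0)) (fun x => x) false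
  let runs := pvRunLengths digits
  match runs with
  | [] => false                       -- 'runs != [] and …' short-circuits
  | r0 :: _ => runs.all (fun r => r == r0)

-- ===== PRECONDITION & SPEC =====
-- A raises ValueError on negative num (int('-') on the sign character); Pre_ excludes exactly those.
def Pre_check_for_same_digit (num : Int) : Prop := 0 ≤ num
instance (num : Int) : Decidable (Pre_check_for_same_digit num) := by unfold Pre_check_for_same_digit; infer_instance
def pvWitness_check_for_same_digit : Int := (1122)

def Spec_check_for_same_digit (num : Int) (out : Bool) : Prop := out = check_for_same_digit_alt num
instance (num : Int) (out : Bool) : Decidable (Spec_check_for_same_digit num out) := by unfold Spec_check_for_same_digit; infer_instance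

-- ===== CLAIM (what is proved, stated in full; the proofs are below) =====
def Claim_equal_check_for_same_digit : Prop := ∀ (num : Int), Dom_check_for_same_digit num → Pre_check_for_same_digit num → Spec_check_for_same_digit num (check_for_same_digit num)

-- ===== LEMMAS AND PROOFS =====

-- Nat.toDigits is never empty (used for: str(num) is nonempty)
theorem pv_toDigitsCore_ne_nil : ∀ (fuel n : Nat) (acc : List Char),
    acc ≠ [] → Nat.toDigitsCore 10 fuel n acc ≠ [] := by
  intro fuel
  induction fuel with
  | zero => intro n acc h; simpa [Nat.toDigitsCore] using h
  | succ f ih =>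
    intro n acc h
    simp only [Nat.toDigitsCore]
    split
    · simp
    · exact ih _ _ (by simp)

theorem pv_toDigits_ne_nil (n : Nat) : Nat.toDigits 10 n ≠ [] := by
  unfold Nat.toDigits
  simp only [Nat.toDigitsCore]
  split
  · simp
  · exact pv_toDigitsCore_ne_nil _ _ _ (by simp)

-- str(num) is never empty
theorem pv_toChars_ne_nil (num : Int) (h : 0 ≤ num) : PySem.Int.toChars num ≠ [] := by
  unfold PySem.Int.toChars
  rw [if_neg (by omega)]
  exact pv_toDigits_ne_nil _

theorem pv_foldl_add_const {t : List Int} {a : Int} (h : ∀ x ∈ t, x = a) :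
    t.foldl PySem.Set.add [a] = [a] := by
  induction t with
  | nil => rfl
  | cons x t ih =>
    have hx : x = a := h x (by simp)
    subst hx
    have : PySem.Set.add [x] x = [x] := by simp [PySem.Set.add, PySem.Set.contains]
    simpa [this] using ih (fun y hy => h y (by simp [hy]))

-- Set.ofList has one element iff the (nonempty) list is constant
theorem pv_ofList_len_one_iff {L : List Int} (h : L ≠ []) :
    (PySem.Set.ofList L).length = 1 ↔ ∀ x ∈ L, ∀ y ∈ L, x = y := by
  constructor
  · intro h1 x hx y hy
    obtain ⟨v, hv⟩ := List.length_eq_one_iff.mp h1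
    have hx' := (PySem.Set.mem_ofList L x).mpr hx
    have hy' := (PySem.Set.mem_ofList L y).mpr hy
    rw [hv] at hx' hy'
    simp at hx' hy'; omega
  · intro hall
    obtain ⟨a, t, rfl⟩ := List.exists_cons_of_ne_nil h
    have ha : ∀ x ∈ t, x = a := by
      intro x hx
      have := hall x (by simp [hx]) a (by simp)
      omega
    rw [PySem.Set.ofList_eq_foldl]
    simp only [List.foldl_cons]
    have : PySem.Set.add [] a = [a] := by simp [PySem.Set.add, PySem.Set.contains]
    rw [this, pv_foldl_add_const ha]
    rfl

-- B-side lemmas: run lengths of a sorted list are exactly the counts of its members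

theorem pv_drop_takeWhile (l : List Int) (p : Int → Bool) :
    l.drop (l.takeWhile p).length = l.dropWhile p := by
  induction l with
  | nil => rfl
  | cons a t ih =>
    by_cases h : p a
    · simp [h, ih]
    · simp [h]

-- a sorted list with all elements ≥ a has no a past the leading (· == a)-run
theorem pv_not_mem_dropWhile : ∀ (l : List Int) (a : Int),
    l.Pairwise (· ≤ ·) → (∀ x ∈ l, a ≤ x) → a ∉ l.dropWhile (· == a) := by
  intro l
  induction l with
  | nil => simp
  | cons b u ih =>
    intro a hp hge
    obtain ⟨hp1, hp2⟩ := List.pairwise_cons.mp hp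
    by_cases hb : b = a
    · subst hb
      rw [List.dropWhile_cons_of_pos (by simp)]
      exact ih b hp2 (fun x hx => hp1 x hx)
    · rw [List.dropWhile_cons_of_neg (by simpa using hb)]
      intro hmem
      rcases List.mem_cons.mp hmem with h | h
      · exact hb h.symm
      · have h1 : b ≤ a := hp1 a h
        have h2 : a ≤ b := hge b (by simp)
        exact hb (le_antisymm h1 h2)

theorem pv_run_count (a : Int) (t : List Int) (hp : (a :: t).Pairwise (· ≤ ·)) :
    ((a :: t).takeWhile (· == a)).length = (a :: t).count a := by
  have hsplit := List.takeWhile_append_dropWhile (p := (· == a)) (l := a :: t)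
  have hcnt : (a :: t).count a
      = ((a :: t).takeWhile (· == a)).count a + ((a :: t).dropWhile (· == a)).count a := by
    conv_lhs => rw [← hsplit]
    exact List.count_append ..
  have h1 : ((a :: t).takeWhile (· == a)).count a = ((a :: t).takeWhile (· == a)).length := by
    rw [List.count_eq_length]
    intro b hb
    exact (beq_iff_eq.mp (List.mem_takeWhile_imp (p := (· == a)) hb)).symm
  have h2 : ((a :: t).dropWhile (· == a)).count a = 0 := by
    rw [List.count_eq_zero]
    exact pv_not_mem_dropWhile (a :: t) a hp
      (fun x hx => by
        rcases List.mem_cons.mp hx with h | h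
        · omega
        · exact (List.pairwise_cons.mp hp).1 x h)
  omega

theorem pv_count_drop (a x : Int) (t : List Int) (hx : x ≠ a) :
    ((a :: t).dropWhile (· == a)).count x = (a :: t).count x := by
  conv_rhs => rw [← List.takeWhile_append_dropWhile (p := (· == a)) (l := a :: t)]
  rw [List.count_append]
  have : ((a :: t).takeWhile (· == a)).count x = 0 := by
    rw [List.count_eq_zero]
    intro hmem
    exact hx (beq_iff_eq.mp (List.mem_takeWhile_imp (p := (· == a)) hmem))
  omega

theorem pv_mem_iff_drop (a x : Int) (t : List Int) :
    x ∈ (a :: t) ↔ x = a ∨ x ∈ (a :: t).dropWhile (· == a) := by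
  constructor
  · intro hx
    by_cases h : x = a
    · exact Or.inl h
    · right
      have := List.takeWhile_append_dropWhile (p := (· == a)) (l := a :: t)
      rw [← this] at hx
      rcases List.mem_append.mp hx with hm | hm
      · exact absurd (beq_iff_eq.mp (List.mem_takeWhile_imp (p := (· == a)) hm)) h
      · exact hm
  · rintro (rfl | h)
    · simp
    · exact (List.dropWhile_sublist _).mem h

theorem pvRunLengths_nil : pvRunLengths ([] : List Int) = [] := by
  rw [pvRunLengths.eq_def]

theorem pvRunLengths_cons (a : Int) (t : List Int) :
    pvRunLengths (a :: t)
      = ((((a :: t).takeWhile (· == a)).length : Nat) : Int)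
        :: pvRunLengths ((a :: t).dropWhile (· == a)) := by
  rw [pvRunLengths.eq_def]
  dsimp only
  rw [pv_drop_takeWhile (a :: t) (· == a)]

-- run lengths of a sorted list = the counts of its members (as a set)
theorem pv_runs_spec : ∀ (n : Nat) (s : List Int), s.length ≤ n → s.Pairwise (· ≤ ·) →
    ∀ r, r ∈ pvRunLengths s ↔ ∃ x ∈ s, r = (s.count x : Int) := by
  intro n
  induction n with
  | zero =>
    intro s hlen _ r
    rw [List.length_eq_zero_iff.mp (Nat.le_zero.mp hlen)]
    simp [pvRunLengths_nil]
  | succ n ihn =>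
    intro s hlen hp r
    match s with
    | [] => simp [pvRunLengths_nil]
    | a :: t =>
    rw [pvRunLengths_cons]
    rw [List.mem_cons]
    have hlq : ((a :: t).dropWhile (· == a)).length ≤ n := by
      have h1 : ((a :: t).dropWhile (· == a)).length ≤ t.length := by
        rw [List.dropWhile_cons_of_pos (by simp)]
        exact (List.dropWhile_sublist _).length_le
      simp only [List.length_cons] at hlen
      omega
    have ih := fun hpd => ihn ((a :: t).dropWhile (· == a)) hlq hpd
    have hpd : ((a :: t).dropWhile (· == a)).Pairwise (· ≤ ·) :=
      hp.sublist (List.dropWhile_sublist _)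
    have hnot := pv_not_mem_dropWhile (a :: t) a hp
      (fun x hx => by
        rcases List.mem_cons.mp hx with h | h
        · omega
        · exact (List.pairwise_cons.mp hp).1 x h)
    constructor
    · intro hr
      rcases hr with h | h
      · exact ⟨a, by simp, by rw [h, pv_run_count a t hp]⟩
      · obtain ⟨x, hx, hrx⟩ := (ih hpd r).mp h
        have hxa : x ≠ a := fun he => hnot (he ▸ hx)
        exact ⟨x, (pv_mem_iff_drop a x t).mpr (Or.inr hx),
          by rw [hrx, pv_count_drop a x t hxa]⟩
    · rintro ⟨x, hx, rfl⟩
      by_cases hxa : x = a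
      · subst hxa
        exact Or.inl (by rw [pv_run_count x t hp])
      · have hxd : x ∈ (a :: t).dropWhile (· == a) := by
          rcases (pv_mem_iff_drop a x t).mp hx with h | h
          · exact absurd h hxa
          · exact h
        refine Or.inr ?_
        rw [← pv_count_drop a x t hxa]
        exact (ih hpd _).mpr ⟨x, hxd, rfl⟩

-- B = true ↔ all digit counts in the sorted list are equal (s nonempty)
theorem pv_alt_iff (s : List Int) (hp : s.Pairwise (· ≤ ·)) (hne : s ≠ []) :
    ((match pvRunLengths s with
      | [] => false
      | r0 :: _ => (pvRunLengths s).all (fun r => r == r0)) = true)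
      ↔ ∀ x ∈ s, ∀ y ∈ s, s.count x = s.count y := by
  obtain ⟨a, t, rfl⟩ := List.exists_cons_of_ne_nil hne
  have hruns := pvRunLengths_cons a t
  have hr0mem : ((((a :: t).takeWhile (· == a)).length : Nat) : Int) ∈ pvRunLengths (a :: t) := by
    rw [hruns]; exact List.mem_cons_self
  rw [hruns]
  show (((((( a :: t).takeWhile (· == a)).length : Nat) : Int)
          :: pvRunLengths ((a :: t).dropWhile (· == a))).all
        (fun r => r == (((( a :: t).takeWhile (· == a)).length : Nat) : Int)) = true)
      ↔ ∀ x ∈ a :: t, ∀ y ∈ a :: t, (a :: t).count x = (a :: t).count y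
  rw [← hruns, List.all_eq_true]
  constructor
  · intro hall x hx y hy
    have hx' := (pv_runs_spec (a :: t).length (a :: t) le_rfl hp _).mpr ⟨x, hx, rfl⟩
    have hy' := (pv_runs_spec (a :: t).length (a :: t) le_rfl hp _).mpr ⟨y, hy, rfl⟩
    have h1 := hall _ hx'
    have h2 := hall _ hy'
    simp only [beq_iff_eq] at h1 h2
    omega
  · intro hcnt r hr
    obtain ⟨x, hx, rfl⟩ := (pv_runs_spec (a :: t).length (a :: t) le_rfl hp r).mp hr
    obtain ⟨y, hy, he⟩ := (pv_runs_spec (a :: t).length (a :: t) le_rfl hp _).mp hr0mem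
    simp only [beq_iff_eq]
    rw [he, Nat.cast_inj]
    exact hcnt x hx y hy

-- ===== VERDICT (by name: the statement is the Claim_ definition above) =====
theorem check_for_same_digit_spec : Claim_equal_check_for_same_digit := by
  intro num _ hpre
  unfold Spec_check_for_same_digit check_for_same_digit check_for_same_digit_alt
  dsimp only
  have hne : PySem.Int.toChars num ≠ [] := pv_toChars_ne_nil num hpre
  rw [PySem.List.foldl_pyRange_pyGetD (PySem.Int.toChars num) ' '
    (fun d (c : Char) => d.modify ((PySem.Int.ofChars? [c]).getD 0) 0 (· + 1))
    (PySem.Dict.empty : PySem.Dict Int Int) (le_refl 0)]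
  rw [show (0 : Int).toNat = 0 from rfl, List.drop_zero]
  rw [← List.foldl_map (f := fun c => (PySem.Int.ofChars? [c]).getD 0)
      (g := fun (d : PySem.Dict Int Int) x => d.modify x 0 (· + 1))]
  rw [← PySem.Dict.counter_eq_foldl]
  set ds := (PySem.Int.toChars num).map (fun c => (PySem.Int.ofChars? [c]).getD 0) with hds
  have hdsne : ds ≠ [] := by simp [hds, hne]
  have hSne : PySem.Set.ofList ds ≠ [] := by
    intro hS
    obtain ⟨a, t, hat⟩ := List.exists_cons_of_ne_nil hdsne
    have : a ∈ PySem.Set.ofList ds := (PySem.Set.mem_ofList ds a).mpr (by rw [hat]; simp)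
    rw [hS] at this; exact absurd this (List.not_mem_nil)
  have hvals : PySem.Dict.values (PySem.Dict.counter ds)
      = (PySem.Set.ofList ds).map (fun k => (List.count k ds : Int)) := by
    show (PySem.Dict.counter ds).items.map (·.2) = _
    rw [PySem.Dict.items_counter, List.map_map]
    simp
  rw [hvals]
  -- A = true ↔ all counts over ds are equal
  have hA : (if (PySem.Set.ofList ((PySem.Set.ofList ds).map (fun k => (List.count k ds : Int)))).length == 1 then true else false) = true
      ↔ ∀ x ∈ ds, ∀ y ∈ ds, ds.count x = ds.count y := by
    have hVne : (PySem.Set.ofList ds).map (fun k => (List.count k ds : Int)) ≠ [] := by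
      simp [hSne]
    rw [show ∀ (b : Bool), (if b = true then true else false) = b from by decide]
    rw [beq_iff_eq, pv_ofList_len_one_iff hVne]
    constructor
    · intro hall x hx y hy
      have h1 : (ds.count x : Int) ∈ (PySem.Set.ofList ds).map (fun k => (List.count k ds : Int)) := by
        exact List.mem_map.mpr ⟨x, (PySem.Set.mem_ofList ds x).mpr hx, rfl⟩
      have h2 : (ds.count y : Int) ∈ (PySem.Set.ofList ds).map (fun k => (List.count k ds : Int)) := by
        exact List.mem_map.mpr ⟨y, (PySem.Set.mem_ofList ds y).mpr hy, rfl⟩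
      have := hall _ h1 _ h2
      omega
    · intro hcnt v hv w hw
      obtain ⟨x, hx, rfl⟩ := List.mem_map.mp hv
      obtain ⟨y, hy, rfl⟩ := List.mem_map.mp hw
      rw [Nat.cast_inj]
      exact hcnt x ((PySem.Set.mem_ofList ds x).mp hx) y ((PySem.Set.mem_ofList ds y).mp hy)
  -- B side
  set s := PySem.List.sorted ds (fun x => x) false with hs
  have hperm : s.Perm ds := PySem.List.sorted_perm ds (fun x => x) false
  have hsp : s.Pairwise (· ≤ ·) := PySem.List.sorted_pairwise ds (fun x => x)
  have hsne : s ≠ [] := by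
    intro h
    exact hdsne (List.Perm.nil_eq (h ▸ hperm)).symm
  have hB := pv_alt_iff s hsp hsne
  have hBiff : (∀ x ∈ s, ∀ y ∈ s, s.count x = s.count y)
      ↔ ∀ x ∈ ds, ∀ y ∈ ds, ds.count x = ds.count y := by
    constructor
    · intro h x hx y hy
      have := h x (hperm.mem_iff.mpr hx) y (hperm.mem_iff.mpr hy)
      rwa [hperm.count_eq, hperm.count_eq] at this
    · intro h x hx y hy
      rw [hperm.count_eq, hperm.count_eq]
      exact h x (hperm.mem_iff.mp hx) y (hperm.mem_iff.mp hy)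
  rw [Bool.eq_iff_iff, hA, hB, hBiff]
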